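-- pv_equiv track=rewrite | github.com/Siddharth9431/HackerRank | Other/Python/teamFor.py | team
-- ===== SOURCE A (Python) =====
-- import heapq
--
-- def team(iq):
--
-- 	teamD = {}
--
-- 	def insert(key, value):
-- 		if key in teamD:
-- 			teamD[key].append(value)
-- 			heapq.heapify(teamD[key])
-- 		else:
-- 			teamD[key] = [value]
--
-- 	for i in sorted(iq):
-- 		if i - 1 in teamD:
-- 			temp = heapq.heappop(teamD[i - 1])
--
-- 			insert(i, temp + 1)
--
-- 			if not teamD[i - 1]:
-- 				del teamD[i - 1]
-- 		else:
-- 			insert(i, 1)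
--
-- 	return min(heapq.heappop(teamD[j]) for j in teamD)
-- ===== SOURCE B (Python) =====
-- def team(iq):
--     counts = {}
--     for x in iq:
--         counts[x] = counts.get(x, 0) + 1
--     best = None        # running minimum over chains already closed
--     frontier = []      # sorted lengths of the chains ending at prev
--     prev = None
--     for v in sorted(counts):
--         c = counts[v]
--         if prev is not None and v == prev + 1:
--             k = min(c, len(frontier))
--             closed = frontier[k:]          # the longer chains that are not extended close here
--             if closed and (best is None or closed[0] < best):
--                 best = closed[0]
--             frontier = [1] * (c - k) + [x + 1 for x in frontier[:k]]
--         else: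
--             if frontier and (best is None or frontier[0] < best):
--                 best = frontier[0]
--             frontier = [1] * c
--         prev = v
--     m = min(frontier)  # ValueError on empty input, as in the original
--     return best if best is not None and best < m else m
-- ===== Notes on version B (the rewrite author's own statement) =====
-- stated objective: faster
-- what changed: A keeps a dict of heapq heaps keyed by chain-end value and re-heapifies a heap after every single push; B counts occurrences once, walks the distinct values in sorted order, and carries only one already-sorted frontier list of open chain lengths (extend the k shortest by slicing, close the rest into a scalar running minimum), with no dict of heaps and no per-element heap maintenance.
import Mathlib
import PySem

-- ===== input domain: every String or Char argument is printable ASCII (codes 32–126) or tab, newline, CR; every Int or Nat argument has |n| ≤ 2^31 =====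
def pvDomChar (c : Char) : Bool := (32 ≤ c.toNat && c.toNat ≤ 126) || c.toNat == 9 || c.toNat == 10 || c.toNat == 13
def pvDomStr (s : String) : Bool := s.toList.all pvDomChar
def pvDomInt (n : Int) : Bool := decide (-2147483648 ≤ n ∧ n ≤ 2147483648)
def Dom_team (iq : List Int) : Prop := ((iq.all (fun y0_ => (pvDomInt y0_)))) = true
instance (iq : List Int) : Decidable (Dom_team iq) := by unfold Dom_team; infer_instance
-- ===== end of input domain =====

-- B replaces A's dict of heapq heaps (re-heapified after every push) by one counting pass
-- plus a single sorted frontier of open chain lengths and a scalar running minimum.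

-- ===== PORT A =====
-- A's heapq heaps hold only Ints and are observed only through heappop (a minimal
-- element), emptiness and the final heappop — all determined by the element multiset.
-- So a heap is ported as the list of its elements: append keeps the multiset (heapify
-- only permutes), and heappop removes one minimal element.  Exact for every value A uses.
def teamPop (h : List Int) : Int × List Int :=
  match PySem.List.min? h (fun x => x) with
  | some m => (m, (PySem.List.remove? h m).getD [])
  | none => (0, [])   -- unreachable: A never pops an empty heap

def teamInsert (d : PySem.Dict Int (List Int)) (key v : Int) : PySem.Dict Int (List Int) :=
  if d.contains key then d.insert key (d.getD key [] ++ [v]) else d.insert key [v]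

def teamStep (d : PySem.Dict Int (List Int)) (i : Int) : PySem.Dict Int (List Int) :=
  match d.get? (i - 1) with
  | some h =>
    let pr := teamPop h
    let d1 := d.insert (i - 1) pr.2
    let d2 := teamInsert d1 i (pr.1 + 1)
    if pr.2 = [] then d2.erase (i - 1) else d2
  | none => teamInsert d i 1

def team (iq : List Int) : Int :=
  let d := (PySem.List.sorted iq (fun x => x)).foldl teamStep PySem.Dict.empty
  (PySem.List.min? (d.items.map (fun q => (teamPop q.2).1)) (fun x => x)).getD 0

-- ===== PORT B =====
-- c ≥ 0 (a count) and k = min(c, len(frontier)) ≥ 0, so the Python slices frontier[:k],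
-- frontier[k:] and the list [1]*(c-k) are take/drop/replicate of .toNat — exact here.
def teamAltStep (c : Int) (st : Option Int × List Int × Option Int) (v : Int) :
    Option Int × List Int × Option Int :=
  let best := st.1
  let frontier := st.2.1
  let prev := st.2.2
  if prev = some (v - 1) then
    let k := min c (frontier.length : Int)
    let closed := frontier.drop k.toNat
    let best' := match closed with
      | [] => best
      | m :: _ => match best with
        | none => some m
        | some b => if m < b then some m else some b
    (best', List.replicate (c - k).toNat 1 ++ (frontier.take k.toNat).map (· + 1), some v)
  else
    let best' := match frontier with
      | [] => best
      | m :: _ => match best with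
        | none => some m
        | some b => if m < b then some m else some b
    (best', List.replicate c.toNat 1, some v)

def team_alt (iq : List Int) : Int :=
  let counts := iq.foldl (fun d x => d.insert x (d.getD x 0 + 1)) PySem.Dict.empty
  let st := (PySem.List.sorted counts.keys (fun x => x)).foldl
      (fun st v => teamAltStep (counts.getD v 0) st v) (none, [], none)
  let m := (PySem.List.min? st.2.1 (fun x => x)).getD 0
  match st.1 with
  | some b => if b < m then b else m
  | none => m

-- ===== PRECONDITION & SPEC =====
-- On the empty list A's final min() over an empty generator raises ValueError (B's min()
-- does too); Pre_ excludes exactly that input.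
def Pre_team (iq : List Int) : Prop := iq ≠ []
instance (iq : List Int) : Decidable (Pre_team iq) := by unfold Pre_team; infer_instance
def pvWitness_team : List Int := [1]

def Spec_team (iq : List Int) (out : Int) : Prop := out = team_alt iq
instance (iq : List Int) (out : Int) : Decidable (Spec_team iq out) := by
  unfold Spec_team; infer_instance

-- ===== CLAIM (what is proved, stated in full; the proofs are below) =====
def Claim_equal_team : Prop := ∀ (iq : List Int), Dom_team iq → Pre_team iq → Spec_team iq (team iq)

-- ===== LEMMAS AND PROOFS =====

-- ---- proof-layer abstractions ----
def hmin (l : List Int) : Int := (PySem.List.min? l (fun x => x)).getD 0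

def omin : Option Int → Int → Int
  | none, m => m
  | some b, m => if m < b then m else b

def bestOf (b : Option Int) (rest : List (Int × List Int)) : Option Int :=
  rest.foldl (fun b q => some (omin b (hmin q.2))) b

-- B's loop body with the count as a natural number
def bstepN (st : Option Int × List Int × Option Int) (v : Int) (c : ℕ) :
    Option Int × List Int × Option Int :=
  if st.2.2 = some (v - 1) then
    let k := min c st.2.1.length
    ((match st.2.1.drop k with
      | [] => st.1
      | m :: _ => some (omin st.1 m)),
     List.replicate (c - k) 1 ++ (st.2.1.take k).map (· + 1), some v)
  else
    ((match st.2.1 with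
      | [] => st.1
      | m :: _ => some (omin st.1 m)),
     List.replicate c 1, some v)

-- simulation invariant between A's dict of heaps and B's (best, frontier, prev)
def SimInv (d : PySem.Dict Int (List Int)) (st : Option Int × List Int × Option Int) : Prop :=
  (st.2.2 = none → d.items = [] ∧ st.1 = none ∧ st.2.1 = []) ∧
  (∀ p, st.2.2 = some p → ∃ rest h,
    d.items = rest ++ [(p, h)] ∧
    (∀ q ∈ rest, q.1 < p ∧ q.2 ≠ []) ∧
    h ≠ [] ∧
    PySem.List.sorted h (fun x => x) = st.2.1 ∧
    (∀ y ∈ st.2.1, 1 ≤ y) ∧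
    st.1 = bestOf none rest)

-- ---- dict structure lemmas ----
lemma dget_none (l : List (Int × List Int)) (k : Int) (h : ∀ q ∈ l, q.1 ≠ k) :
    (PySem.Dict.mk l).get? k = none := by
  induction l with
  | nil => rfl
  | cons q t ih =>
    rw [show (q = (q.1, q.2)) from rfl, PySem.Dict.get?_mk_cons]
    have : (q.1 == k) = false := by
      simp only [beq_eq_false_iff_ne]; exact h q (List.mem_cons_self)
    rw [this]
    exact ih (fun q hq => h q (List.mem_cons_of_mem _ hq))

lemma dget_skip (pre l : List (Int × List Int)) (k : Int) (hk : ∀ q ∈ pre, q.1 ≠ k) :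
    (PySem.Dict.mk (pre ++ l)).get? k = (PySem.Dict.mk l).get? k := by
  induction pre with
  | nil => rfl
  | cons q t ih =>
    rw [List.cons_append, show (q = (q.1, q.2)) from rfl, PySem.Dict.get?_mk_cons]
    have : (q.1 == k) = false := by
      simp only [beq_eq_false_iff_ne]; exact hk q (List.mem_cons_self)
    rw [this]
    exact ih (fun q hq => hk q (List.mem_cons_of_mem _ hq))

lemma dget_cons_self (k : Int) (v : List Int) (l : List (Int × List Int)) :
    (PySem.Dict.mk ((k, v) :: l)).get? k = some v := by
  rw [PySem.Dict.get?_mk_cons]; simp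

lemma dcontains_true (l : List (Int × List Int)) (k : Int) (h : ∃ q ∈ l, q.1 = k) :
    (PySem.Dict.mk l).contains k = true := by
  obtain ⟨q, hq, hqk⟩ := h
  simp only [PySem.Dict.contains, List.any_eq_true]
  exact ⟨q, hq, by simp [hqk]⟩

lemma dcontains_false (l : List (Int × List Int)) (k : Int) (h : ∀ q ∈ l, q.1 ≠ k) :
    (PySem.Dict.mk l).contains k = false := by
  simp only [PySem.Dict.contains, List.any_eq_false]
  intro q hq; simp [h q hq]

lemma dinsert_new (l : List (Int × List Int)) (k : Int) (w : List Int)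
    (h : ∀ q ∈ l, q.1 ≠ k) :
    (PySem.Dict.mk l).insert k w = PySem.Dict.mk (l ++ [(k, w)]) := by
  unfold PySem.Dict.insert
  rw [dcontains_false l k h]; simp

lemma map_skip (l : List (Int × List Int)) (k : Int) (w' : List Int)
    (h : ∀ q ∈ l, q.1 ≠ k) :
    l.map (fun p => if (p.1 == k) = true then (k, w') else p) = l := by
  induction l with
  | nil => rfl
  | cons q t ih =>
    rw [List.map_cons]
    have : (q.1 == k) = false := by
      simp only [beq_eq_false_iff_ne]; exact h q (List.mem_cons_self)
    rw [this, if_neg Bool.false_ne_true, ih (fun q hq => h q (List.mem_cons_of_mem _ hq))]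

lemma dinsert_over (pre suf : List (Int × List Int)) (k : Int) (w w' : List Int)
    (h1 : ∀ q ∈ pre, q.1 ≠ k) (h2 : ∀ q ∈ suf, q.1 ≠ k) :
    (PySem.Dict.mk (pre ++ (k, w) :: suf)).insert k w' =
      PySem.Dict.mk (pre ++ (k, w') :: suf) := by
  unfold PySem.Dict.insert
  rw [dcontains_true _ k ⟨(k, w), by simp, rfl⟩, if_pos rfl]
  congr 1
  rw [List.map_append, List.map_cons, map_skip pre k w' h1, map_skip suf k w' h2]
  simp

lemma derase (pre suf : List (Int × List Int)) (k : Int) (w : List Int)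
    (h1 : ∀ q ∈ pre, q.1 ≠ k) (h2 : ∀ q ∈ suf, q.1 ≠ k) :
    (PySem.Dict.mk (pre ++ (k, w) :: suf)).erase k = PySem.Dict.mk (pre ++ suf) := by
  unfold PySem.Dict.erase
  congr 1
  rw [List.filter_append, List.filter_cons]
  have : (!(k, w).1 == k) = false := by simp
  rw [this]
  simp only [Bool.false_eq_true]
  congr 1
  · apply List.filter_eq_self.mpr; intro q hq; simp [h1 q hq]
  · apply List.filter_eq_self.mpr; intro q hq; simp [h2 q hq]

-- ---- sorted-list lemmas ----
lemma sorted_pw (h F : List Int) (hs : PySem.List.sorted h (fun x => x) = F) :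
    F.Pairwise (· ≤ ·) := by
  have := PySem.List.sorted_pairwise h (fun x => x)
  rwa [hs] at this

lemma sorted_ne_nil (h F : List Int) (hs : PySem.List.sorted h (fun x => x) = F)
    (hF : F ≠ []) : h ≠ [] := by
  intro he; apply hF; rw [← hs, he]; rfl

lemma sorted_nil_of (h F : List Int) (hs : PySem.List.sorted h (fun x => x) = F)
    (hF : F = []) : h = [] := by
  rw [← PySem.List.sorted_eq_nil_iff h (fun x => x) false, hs, hF]

lemma sorted_app_ge (g G : List Int) (y : Int)
    (hs : PySem.List.sorted g (fun x => x) = G) (hy : ∀ z ∈ G, z ≤ y) :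
    PySem.List.sorted (g ++ [y]) (fun x => x) = G ++ [y] := by
  apply PySem.List.sorted_id_eq_of_perm_of_pairwise
  · exact List.Perm.append ((hs ▸ PySem.List.sorted_perm g (fun x => x) false)) (List.Perm.refl _)
  · rw [List.pairwise_append]
    exact ⟨sorted_pw g G hs, List.pairwise_singleton _ _,
      fun a ha b hb => by simp at hb; subst hb; exact hy a ha⟩

lemma sorted_app_le (g G : List Int) (y : Int)
    (hs : PySem.List.sorted g (fun x => x) = G) (hy : ∀ z ∈ G, y ≤ z) :
    PySem.List.sorted (g ++ [y]) (fun x => x) = y :: G := by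
  apply PySem.List.sorted_id_eq_of_perm_of_pairwise
  · have hG : G.Perm g := hs ▸ PySem.List.sorted_perm g (fun x => x) false
    exact (hG.cons y).trans (List.perm_append_singleton y g).symm
  · exact List.pairwise_cons.mpr ⟨hy, sorted_pw g G hs⟩

lemma min?_sorted_cons (h : List Int) (m : Int) (t : List Int)
    (hs : PySem.List.sorted h (fun x => x) = m :: t) :
    PySem.List.min? h (fun x => x) = some m := by
  have hne : h ≠ [] := sorted_ne_nil h (m :: t) hs (by simp)
  cases hmin : PySem.List.min? h (fun x => x) with
  | none => exact absurd ((PySem.List.min?_eq_none_iff h _).mp hmin) hne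
  | some m0 =>
    have hm0h : m0 ∈ h := PySem.List.min?_mem hmin
    have hmh : m ∈ h := by
      have : m ∈ PySem.List.sorted h (fun x => x) := by rw [hs]; exact List.mem_cons_self
      rwa [PySem.List.mem_sorted] at this
    have h1 : m ≤ m0 := PySem.List.key_head_sorted_le h (fun x => x) hs m0 hm0h
    have h2 : m0 ≤ m := PySem.List.min?_isMin hmin m hmh
    exact congrArg some (le_antisymm h2 h1)

lemma hmin_sorted (h : List Int) (m : Int) (t : List Int)
    (hs : PySem.List.sorted h (fun x => x) = m :: t) : hmin h = m := by
  unfold hmin; rw [min?_sorted_cons h m t hs]; rfl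

lemma sorted_cons_erase (h : List Int) (m : Int) (t : List Int)
    (hs : PySem.List.sorted h (fun x => x) = m :: t) :
    PySem.List.sorted (h.erase m) (fun x => x) = t := by
  apply PySem.List.sorted_id_eq_of_perm_of_pairwise
  · have hp : (m :: t).Perm h := hs ▸ PySem.List.sorted_perm h (fun x => x) false
    have := (hp.symm).erase m
    rw [List.erase_cons_head] at this
    exact this.symm
  · exact (List.pairwise_cons.mp (sorted_pw h (m :: t) hs)).2

lemma teamPop_eq (h : List Int) (m : Int) (t : List Int)
    (hs : PySem.List.sorted h (fun x => x) = m :: t) :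
    teamPop h = (m, h.erase m) := by
  have hmh : m ∈ h := by
    have : m ∈ PySem.List.sorted h (fun x => x) := by rw [hs]; exact List.mem_cons_self
    rwa [PySem.List.mem_sorted] at this
  unfold teamPop
  rw [min?_sorted_cons h m t hs]
  show (m, (PySem.List.remove? h m).getD []) = (m, h.erase m)
  rw [PySem.List.remove?_eq_some_erase h m hmh]
  rfl

lemma teamPop_fst (h : List Int) (hne : h ≠ []) : (teamPop h).1 = hmin h := by
  unfold teamPop hmin
  cases hm : PySem.List.min? h (fun x => x) with
  | none => exact absurd ((PySem.List.min?_eq_none_iff h _).mp hm) hne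
  | some m => rfl

-- ---- omin / bestOf lemmas ----
lemma omin_some (b m : Int) : omin (some b) m = min b m := by
  show (if m < b then m else b) = min b m
  rw [Int.min_def]; split_ifs <;> omega

lemma foldl_omin_some (t : List Int) (b : Int) :
    t.foldl (fun b m => some (omin b m)) (some b) = some (t.foldl min b) := by
  induction t generalizing b with
  | nil => rfl
  | cons x t ih => simp only [List.foldl_cons, omin_some, ih]

lemma min?_getD_eq (L : List Int) :
    (PySem.List.min? L (fun x => x)).getD 0 =
      (L.foldl (fun b m => some (omin b m)) (none : Option Int)).getD 0 := by
  cases L with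
  | nil => rfl
  | cons x t =>
    rw [PySem.List.min?_id_cons]
    simp only [List.foldl_cons]
    have : omin none x = x := rfl
    rw [this, foldl_omin_some]

lemma bestOf_append (b : Option Int) (rest : List (Int × List Int)) (q : Int × List Int) :
    bestOf b (rest ++ [q]) = some (omin (bestOf b rest) (hmin q.2)) := by
  simp [bestOf, List.foldl_append]

lemma match_omin (best : Option Int) (m : Int) :
    (match best with
     | none => some m
     | some b => if m < b then some m else some b) = some (omin best m) := by
  cases best with
  | none => rfl
  | some b =>
    show (if m < b then some m else some b) = some (if m < b then m else b)
    split_ifs <;> rfl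

-- A's final min over the dict equals omin of closed minima and the live heap's minimum
lemma final_eq (rest : List (Int × List Int)) (p : Int) (h : List Int)
    (hne : ∀ q ∈ rest, q.2 ≠ []) (hh : h ≠ []) :
    (PySem.List.min? ((rest ++ [(p, h)]).map (fun q => (teamPop q.2).1)) (fun x => x)).getD 0
      = omin (bestOf none rest) (hmin h) := by
  have hmap : (rest ++ [(p, h)]).map (fun q => (teamPop q.2).1)
      = (rest ++ [(p, h)]).map (fun q => hmin q.2) := by
    apply List.map_congr_left
    intro q hq
    rcases List.mem_append.mp hq with hq | hq
    · exact teamPop_fst q.2 (hne q hq)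
    · simp at hq; subst hq; exact teamPop_fst h hh
  rw [hmap, min?_getD_eq, List.foldl_map]
  have : (rest ++ [(p, h)]).foldl (fun b q => some (omin b (hmin q.2))) none
      = bestOf none (rest ++ [(p, h)]) := rfl
  rw [this, bestOf_append]
  rfl

-- ---- single-iteration lemmas for A's loop ----
lemma step_new (l : List (Int × List Int)) (v : Int)
    (h1 : ∀ q ∈ l, q.1 ≠ v - 1) (h2 : ∀ q ∈ l, q.1 ≠ v) :
    teamStep (PySem.Dict.mk l) v = PySem.Dict.mk (l ++ [(v, [1])]) := by
  unfold teamStep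
  rw [dget_none l (v - 1) h1]
  unfold teamInsert
  rw [dcontains_false l v h2]
  simp only [Bool.false_eq_true]
  exact dinsert_new l v [1] h2

lemma step_ones (pre : List (Int × List Int)) (v : Int) (g : List Int)
    (h1 : ∀ q ∈ pre, q.1 ≠ v - 1 ∧ q.1 ≠ v) :
    teamStep (PySem.Dict.mk (pre ++ [(v, g)])) v = PySem.Dict.mk (pre ++ [(v, g ++ [1])]) := by
  unfold teamStep
  have hget : (PySem.Dict.mk (pre ++ [(v, g)])).get? (v - 1) = none := by
    apply dget_none; intro q hq
    rcases List.mem_append.mp hq with hq | hq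
    · exact (h1 q hq).1
    · simp at hq; subst hq; omega
  rw [hget]
  unfold teamInsert
  have hc : (PySem.Dict.mk (pre ++ [(v, g)])).contains v = true :=
    dcontains_true _ v ⟨(v, g), by simp, rfl⟩
  rw [hc, if_pos rfl]
  have hgetD : (PySem.Dict.mk (pre ++ [(v, g)])).getD v [] = g := by
    unfold PySem.Dict.getD
    rw [dget_skip pre [(v, g)] v (fun q hq => (h1 q hq).2), dget_cons_self]; rfl
  rw [hgetD]
  exact dinsert_over pre [] v g (g ++ [1]) (fun q hq => (h1 q hq).2) (by simp)

lemma teamStep_some (d : PySem.Dict Int (List Int)) (i : Int) (h : List Int)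
    (hget : d.get? (i - 1) = some h) :
    teamStep d i =
      (if (teamPop h).2 = []
       then (teamInsert (d.insert (i - 1) (teamPop h).2) i ((teamPop h).1 + 1)).erase (i - 1)
       else teamInsert (d.insert (i - 1) (teamPop h).2) i ((teamPop h).1 + 1)) := by
  unfold teamStep
  rw [hget]

-- one pop iteration; `tail` is [] (key v not created yet) or [(v, g)]
lemma step_pop_mid (rest : List (Int × List Int)) (p : Int) (hp : List Int) (m : Int)
    (F' : List Int) (g : List Int)
    (hk : ∀ q ∈ rest, q.1 < p)
    (hs : PySem.List.sorted hp (fun x => x) = m :: F') :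
    teamStep (PySem.Dict.mk (rest ++ [(p, hp), (p + 1, g)])) (p + 1)
      = PySem.Dict.mk ((if F' = [] then rest else rest ++ [(p, hp.erase m)])
          ++ [(p + 1, g ++ [m + 1])]) := by
  have herase : PySem.List.sorted (hp.erase m) (fun x => x) = F' := sorted_cons_erase hp m F' hs
  have hpop : teamPop hp = (m, hp.erase m) := teamPop_eq hp m F' hs
  have hkne : ∀ q ∈ rest, q.1 ≠ p := fun q hq => by have := hk q hq; omega
  have hkne1 : ∀ q ∈ rest, q.1 ≠ p + 1 := fun q hq => by have := hk q hq; omega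
  have hidx : p + 1 - 1 = p := by omega
  have hget : (PySem.Dict.mk (rest ++ [(p, hp), (p + 1, g)])).get? (p + 1 - 1) = some hp := by
    rw [hidx, dget_skip rest _ p hkne]
    exact dget_cons_self p hp [(p + 1, g)]
  rw [teamStep_some _ _ hp hget, hpop, hidx]
  have hins1 : (PySem.Dict.mk (rest ++ [(p, hp), (p + 1, g)])).insert p (hp.erase m)
      = PySem.Dict.mk (rest ++ [(p, hp.erase m), (p + 1, g)]) :=
    dinsert_over rest [(p + 1, g)] p hp (hp.erase m) hkne (by intro q hq; simp at hq; subst hq; omega)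
  rw [hins1]
  have hins2 : teamInsert (PySem.Dict.mk (rest ++ [(p, hp.erase m), (p + 1, g)])) (p + 1) (m + 1)
      = PySem.Dict.mk (rest ++ [(p, hp.erase m), (p + 1, g ++ [m + 1])]) := by
    unfold teamInsert
    have hne : ∀ q ∈ rest ++ [(p, hp.erase m)], q.1 ≠ p + 1 := by
      intro q hq
      rcases List.mem_append.mp hq with hq | hq
      · exact hkne1 q hq
      · simp at hq; subst hq; omega
    have hc : (PySem.Dict.mk (rest ++ [(p, hp.erase m), (p + 1, g)])).contains (p + 1) = true :=
      dcontains_true _ _ ⟨(p + 1, g), by simp, rfl⟩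
    rw [hc, if_pos rfl]
    have hgd : (PySem.Dict.mk (rest ++ [(p, hp.erase m), (p + 1, g)])).getD (p + 1) [] = g := by
      unfold PySem.Dict.getD
      rw [show rest ++ [(p, hp.erase m), (p + 1, g)]
            = (rest ++ [(p, hp.erase m)]) ++ [(p + 1, g)] by simp,
        dget_skip _ _ _ hne, dget_cons_self]
      rfl
    rw [hgd]
    rw [show rest ++ [(p, hp.erase m), (p + 1, g)]
          = (rest ++ [(p, hp.erase m)]) ++ (p + 1, g) :: [] by simp]
    rw [dinsert_over _ [] (p + 1) g (g ++ [m + 1]) hne (by simp)]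
    congr 1; simp
  rw [hins2]
  by_cases hF : F' = []
  · have he : hp.erase m = [] := sorted_nil_of _ F' herase hF
    rw [if_pos he, hF, if_pos rfl, he]
    rw [show rest ++ [(p, ([] : List Int)), (p + 1, g ++ [m + 1])]
          = rest ++ (p, ([] : List Int)) :: [(p + 1, g ++ [m + 1])] by simp]
    rw [derase rest [(p + 1, g ++ [m + 1])] p [] hkne
      (by intro q hq; simp at hq; subst hq; omega)]
  · have he : hp.erase m ≠ [] := sorted_ne_nil _ F' herase hF
    rw [if_neg he, if_neg hF]
    congr 1
    simp

lemma step_pop_first (rest : List (Int × List Int)) (p : Int) (hp : List Int) (m : Int)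
    (F' : List Int)
    (hk : ∀ q ∈ rest, q.1 < p)
    (hs : PySem.List.sorted hp (fun x => x) = m :: F') :
    teamStep (PySem.Dict.mk (rest ++ [(p, hp)])) (p + 1)
      = PySem.Dict.mk ((if F' = [] then rest else rest ++ [(p, hp.erase m)])
          ++ [(p + 1, [m + 1])]) := by
  have herase : PySem.List.sorted (hp.erase m) (fun x => x) = F' := sorted_cons_erase hp m F' hs
  have hpop : teamPop hp = (m, hp.erase m) := teamPop_eq hp m F' hs
  have hkne : ∀ q ∈ rest, q.1 ≠ p := fun q hq => by have := hk q hq; omega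
  have hkne1 : ∀ q ∈ rest, q.1 ≠ p + 1 := fun q hq => by have := hk q hq; omega
  have hidx : p + 1 - 1 = p := by omega
  have hget : (PySem.Dict.mk (rest ++ [(p, hp)])).get? (p + 1 - 1) = some hp := by
    rw [hidx, dget_skip rest _ p hkne]
    exact dget_cons_self p hp []
  rw [teamStep_some _ _ hp hget, hpop, hidx]
  have hins1 : (PySem.Dict.mk (rest ++ [(p, hp)])).insert p (hp.erase m)
      = PySem.Dict.mk (rest ++ [(p, hp.erase m)]) :=
    dinsert_over rest [] p hp (hp.erase m) hkne (by simp)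
  rw [hins1]
  have hne : ∀ q ∈ rest ++ [(p, hp.erase m)], q.1 ≠ p + 1 := by
    intro q hq
    rcases List.mem_append.mp hq with hq | hq
    · exact hkne1 q hq
    · simp at hq; subst hq; omega
  have hins2 : teamInsert (PySem.Dict.mk (rest ++ [(p, hp.erase m)])) (p + 1) (m + 1)
      = PySem.Dict.mk (rest ++ [(p, hp.erase m), (p + 1, [m + 1])]) := by
    unfold teamInsert
    rw [dcontains_false _ _ hne, if_neg Bool.false_ne_true, dinsert_new _ _ _ hne]
    congr 1; simp
  rw [hins2]
  by_cases hF : F' = []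
  · have he : hp.erase m = [] := sorted_nil_of _ F' herase hF
    rw [if_pos he, hF, if_pos rfl, he]
    rw [show rest ++ [(p, ([] : List Int)), (p + 1, [m + 1])]
          = rest ++ (p, ([] : List Int)) :: [(p + 1, [m + 1])] by simp]
    rw [derase rest [(p + 1, [m + 1])] p [] hkne
      (by intro q hq; simp at hq; subst hq; omega)]
  · have he : hp.erase m ≠ [] := sorted_ne_nil _ F' herase hF
    rw [if_neg he, if_neg hF]
    congr 1
    simp

-- ---- phase lemmas ----
lemma onesPhase : ∀ (c : ℕ) (pre : List (Int × List Int)) (v : Int) (g G : List Int),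
    (∀ q ∈ pre, q.1 ≠ v - 1 ∧ q.1 ≠ v) →
    PySem.List.sorted g (fun x => x) = G →
    (∀ y ∈ G, 1 ≤ y) →
    ∃ g', PySem.List.sorted g' (fun x => x) = List.replicate c 1 ++ G ∧
      (List.replicate c v).foldl teamStep (PySem.Dict.mk (pre ++ [(v, g)]))
        = PySem.Dict.mk (pre ++ [(v, g')]) := by
  intro c
  induction c with
  | zero =>
    intro pre v g G hpre hs h1
    exact ⟨g, by simpa using hs, by simp⟩
  | succ c ih =>
    intro pre v g G hpre hs h1
    rw [show List.replicate (c + 1) v = v :: List.replicate c v from rfl,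
      List.foldl_cons, step_ones pre v g hpre]
    have hs1 : PySem.List.sorted (g ++ [1]) (fun x => x) = 1 :: G :=
      sorted_app_le g G 1 hs h1
    obtain ⟨g', hg', hfold⟩ := ih pre v (g ++ [1]) (1 :: G) hpre hs1
      (by intro y hy; rcases List.mem_cons.mp hy with rfl | hy
          · omega
          · exact h1 y hy)
    refine ⟨g', ?_, hfold⟩
    rw [hg', List.replicate_succ', List.append_assoc]
    rfl

lemma popPhase : ∀ (n : ℕ) (F : List Int) (rest : List (Int × List Int)) (p : Int)
    (hp g G : List Int),
    (∀ q ∈ rest, q.1 < p) →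
    PySem.List.sorted hp (fun x => x) = F →
    PySem.List.sorted g (fun x => x) = G →
    F ≠ [] → n ≤ F.length →
    (∀ y ∈ G, ∀ x ∈ F, y ≤ x + 1) →
    ∃ g', PySem.List.sorted g' (fun x => x) = G ++ (F.take n).map (· + 1) ∧
      ((n = F.length →
          (List.replicate n (p + 1)).foldl teamStep
              (PySem.Dict.mk (rest ++ [(p, hp), (p + 1, g)]))
            = PySem.Dict.mk (rest ++ [(p + 1, g')])) ∧
       (n < F.length →
          ∃ hp', PySem.List.sorted hp' (fun x => x) = F.drop n ∧ hp' ≠ [] ∧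
            (List.replicate n (p + 1)).foldl teamStep
                (PySem.Dict.mk (rest ++ [(p, hp), (p + 1, g)]))
              = PySem.Dict.mk (rest ++ [(p, hp'), (p + 1, g')]))) := by
  intro n
  induction n with
  | zero =>
    intro F rest p hp g G hk hshp hsg hF hlen hGle
    refine ⟨g, by simpa using hsg, fun h0 => ?_, fun _ => ?_⟩
    · exact absurd (List.length_eq_zero_iff.mp h0.symm) hF
    · exact ⟨hp, by simpa using hshp, sorted_ne_nil hp F hshp hF, by simp⟩
  | succ n ih =>
    intro F rest p hp g G hk hshp hsg hF hlen hGle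
    cases F with
    | nil => exact absurd rfl hF
    | cons m F' =>
      rw [show List.replicate (n + 1) (p + 1) = (p + 1) :: List.replicate n (p + 1) from rfl,
        List.foldl_cons, step_pop_mid rest p hp m F' g hk hshp]
      have hsg1 : PySem.List.sorted (g ++ [m + 1]) (fun x => x) = G ++ [m + 1] :=
        sorted_app_ge g G (m + 1) hsg (fun z hz => hGle z hz m List.mem_cons_self)
      have hmle : ∀ x ∈ F', m ≤ x :=
        (List.pairwise_cons.mp (sorted_pw hp (m :: F') hshp)).1
      by_cases hF' : F' = []
      · subst hF'
        have hn : n = 0 := by simp at hlen; omega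
        subst hn
        rw [if_pos rfl]
        refine ⟨g ++ [m + 1], ?_, fun _ => by simp, fun hlt => absurd hlt (by simp)⟩
        rw [hsg1]; simp
      · rw [if_neg hF', List.append_assoc,
          show [(p, hp.erase m)] ++ [(p + 1, g ++ [m + 1])]
            = [(p, hp.erase m), (p + 1, g ++ [m + 1])] from rfl]
        have herase : PySem.List.sorted (hp.erase m) (fun x => x) = F' :=
          sorted_cons_erase hp m F' hshp
        obtain ⟨g', hg', hcase⟩ := ih F' rest p (hp.erase m) (g ++ [m + 1]) (G ++ [m + 1])
          hk herase hsg1 hF' (by simp at hlen ⊢; omega)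
          (by intro y hy x hx
              rcases List.mem_append.mp hy with hy | hy
              · exact hGle y hy x (List.mem_cons_of_mem _ hx)
              · simp at hy; subst hy; have := hmle x hx; omega)
        refine ⟨g', ?_, ?_, ?_⟩
        · rw [hg']; simp
        · intro hlen1
          rw [hcase.1 (by simp at hlen1; omega)]
        · intro hlt1
          obtain ⟨hp', h1, h2, h3⟩ := hcase.2 (by simp at hlt1 ⊢; omega)
          exact ⟨hp', by simpa using h1, h2, h3⟩

-- ---- one whole run of equal values ----
lemma bstepN_adj (best : Option Int) (L : List Int) (p : Int) (c : ℕ) :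
    bstepN (best, L, some p) (p + 1) c =
      ((match L.drop (min c L.length) with
        | [] => best
        | m :: _ => some (omin best m)),
       List.replicate (c - min c L.length) 1 ++ (L.take (min c L.length)).map (· + 1),
       some (p + 1)) := by
  unfold bstepN
  rw [if_pos (congrArg some (by omega : p = p + 1 - 1))]

lemma bstepN_gap (best : Option Int) (L : List Int) (prev : Option Int) (v : Int) (c : ℕ)
    (h : prev ≠ some (v - 1)) :
    bstepN (best, L, prev) v c =
      ((match L with | [] => best | m :: _ => some (omin best m)),
       List.replicate c 1, some v) := by
  unfold bstepN
  rw [if_neg h]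

lemma blockStep (d : PySem.Dict Int (List Int)) (st : Option Int × List Int × Option Int)
    (v : Int) (c : ℕ) (hc : 1 ≤ c) (hInv : SimInv d st)
    (hv : ∀ p, st.2.2 = some p → p < v) :
    SimInv ((List.replicate c v).foldl teamStep d) (bstepN st v c) := by
  obtain ⟨best, F, prev⟩ := st
  obtain ⟨c', rfl⟩ : ∃ c', c = c' + 1 := ⟨c - 1, by omega⟩
  obtain ⟨hnone, hsome⟩ := hInv
  cases prev with
  | none =>
    obtain ⟨hd0, hb0, hf0⟩ := hnone rfl
    have hb0' : best = none := hb0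
    have hf0' : F = [] := hf0
    subst hb0'; subst hf0'
    have hd : d = PySem.Dict.mk [] := PySem.Dict.ext hd0
    subst hd
    rw [show List.replicate (c' + 1) v = v :: List.replicate c' v from rfl,
      List.foldl_cons, step_new [] v (by simp) (by simp)]
    obtain ⟨g', hg', hfold⟩ := onesPhase c' [] v [1] [1] (by simp) rfl (by simp)
    rw [hfold, bstepN_gap none [] none v (c' + 1) (by simp)]
    refine ⟨fun h0 => absurd h0 (Option.some_ne_none _), ?_⟩
    intro p' hp'
    injection hp' with hp'; subst hp'
    refine ⟨[], g', rfl, by simp, ?_, ?_, ?_, rfl⟩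
    · exact sorted_ne_nil g' _ hg' (by simp)
    · rw [hg']; simp [List.replicate_succ']
    · intro y hy
      have hy' : y ∈ List.replicate (c' + 1) 1 := hy
      have := List.eq_of_mem_replicate hy'; omega
  | some p =>
    obtain ⟨rest, h, hitems, hrest, hhne, hsortF, honeF, hbest⟩ := hsome p rfl
    have hd : d = PySem.Dict.mk (rest ++ [(p, h)]) := PySem.Dict.ext hitems
    subst hd
    have hpv : p < v := hv p rfl
    have hbest' : best = bestOf none rest := hbest
    have hFne : F ≠ [] := fun h0 => hhne (sorted_nil_of h F hsortF h0)
    obtain ⟨m, F', rfl⟩ : ∃ m F', F = m :: F' := by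
      cases F with
      | nil => exact absurd rfl hFne
      | cons a b => exact ⟨a, b, rfl⟩
    have hsF : PySem.List.sorted h (fun x => x) = m :: F' := hsortF
    have h1m : (1 : Int) ≤ m := honeF m List.mem_cons_self
    have honeF' : ∀ x ∈ F', (1 : Int) ≤ x := fun x hx => honeF x (List.mem_cons_of_mem _ hx)
    have hkeys : ∀ q ∈ rest, q.1 < p := fun q hq => (hrest q hq).1
    by_cases hadj : p = v - 1
    · -- adjacent run: v = p + 1
      have hv2 : v = p + 1 := by omega
      subst hv2
      rw [show List.replicate (c' + 1) (p + 1) = (p + 1) :: List.replicate c' (p + 1) from rfl,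
        List.foldl_cons, step_pop_first rest p h m F' hkeys hsF,
        bstepN_adj best (m :: F') p (c' + 1)]
      by_cases hF' : F' = []
      · subst hF'
        rw [if_pos rfl]
        obtain ⟨g', hg', hfold⟩ := onesPhase c' rest (p + 1) [m + 1] [m + 1]
          (by intro q hq; have := hkeys q hq; constructor <;> omega) rfl
          (by intro y hy; simp at hy; omega)
        rw [hfold]
        have hk : min (c' + 1) (List.length (m :: ([] : List Int))) = 1 := by simp
        rw [hk]
        refine ⟨fun h0 => absurd h0 (Option.some_ne_none _), ?_⟩
        intro p' hp'
        injection hp' with hp'; subst hp'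
        refine ⟨rest, g', rfl, ?_, ?_, ?_, ?_, hbest'⟩
        · intro q hq; exact ⟨by have := hkeys q hq; omega, (hrest q hq).2⟩
        · exact sorted_ne_nil g' _ hg' (by simp)
        · rw [hg']; simp
        · intro y hy
          have hy' : y ∈ List.replicate (c' + 1 - 1) 1 ++ [m + 1] := hy
          rcases List.mem_append.mp hy' with hy2 | hy2
          · have := List.eq_of_mem_replicate hy2; omega
          · simp at hy2; omega
      · rw [if_neg hF', List.append_assoc,
          show [(p, h.erase m)] ++ [(p + 1, [m + 1])]
            = [(p, h.erase m), (p + 1, [m + 1])] from rfl]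
        have herase : PySem.List.sorted (h.erase m) (fun x => x) = F' :=
          sorted_cons_erase h m F' hsF
        have hmle : ∀ x ∈ F', m ≤ x :=
          (List.pairwise_cons.mp (sorted_pw h (m :: F') hsF)).1
        rw [show List.replicate c' (p + 1)
              = List.replicate (min c' F'.length) (p + 1)
                ++ List.replicate (c' - min c' F'.length) (p + 1) by
            rw [← List.replicate_add]; congr 1; omega,
          List.foldl_append]
        obtain ⟨g', hg', hcase⟩ := popPhase (min c' F'.length) F' rest p (h.erase m)
          [m + 1] [m + 1] hkeys herase rfl hF' (by omega)
          (by intro y hy x hx; simp at hy; subst hy; have := hmle x hx; omega)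
        by_cases hcn : min c' F'.length = F'.length
        · -- every remaining open chain gets extended; maybe new 1-chains after
          rw [hcase.1 hcn]
          obtain ⟨g'', hg'', hfold2⟩ := onesPhase (c' - min c' F'.length) rest (p + 1) g'
            ([m + 1] ++ (F'.take (min c' F'.length)).map (· + 1))
            (by intro q hq; have := hkeys q hq; constructor <;> omega) hg'
            (by intro y hy
                rcases List.mem_append.mp hy with hy2 | hy2
                · simp at hy2; omega
                · obtain ⟨x, hx, rfl⟩ := List.mem_map.mp hy2
                  have := honeF' x (List.mem_of_mem_take hx); omega)
          rw [hfold2]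
          have hk : min (c' + 1) (List.length (m :: F')) = F'.length + 1 := by
            simp; omega
          rw [hk]
          have hdropnil : (m :: F').drop (F'.length + 1) = [] := by
            simp
          rw [hdropnil]
          refine ⟨fun h0 => absurd h0 (Option.some_ne_none _), ?_⟩
          intro p' hp'
          injection hp' with hp'; subst hp'
          refine ⟨rest, g'', rfl, ?_, ?_, ?_, ?_, hbest'⟩
          · intro q hq; exact ⟨by have := hkeys q hq; omega, (hrest q hq).2⟩
          · exact sorted_ne_nil g'' _ hg'' (by simp)
          · rw [hg'', hcn, List.take_length]
            simp [List.take_succ_cons]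
          · intro y hy
            have hy' : y ∈ List.replicate (c' + 1 - (F'.length + 1)) 1
                ++ ((m :: F').take (F'.length + 1)).map (· + 1) := hy
            rcases List.mem_append.mp hy' with hy2 | hy2
            · have := List.eq_of_mem_replicate hy2; omega
            · obtain ⟨x, hx, rfl⟩ := List.mem_map.mp hy2
              have := honeF x (List.mem_of_mem_take hx); omega
        · -- the run is exhausted first: some chains at p stay open no more and close
          have hcc : min c' F'.length = c' := by omega
          obtain ⟨hp', hshp', hhp'ne, hfold2⟩ := hcase.2 (by omega)
          rw [hfold2]
          rw [show List.replicate (c' - min c' F'.length) (p + 1) = [] by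
            rw [hcc]; simp]
          rw [List.foldl_nil]
          have hk : min (c' + 1) (List.length (m :: F')) = c' + 1 := by
            simp; omega
          rw [hk]
          have hdrop : (m :: F').drop (c' + 1) = F'.drop c' := by
            simp [List.drop_succ_cons]
          rw [hdrop]
          have hdne : F'.drop c' ≠ [] := by
            intro h0; exact hhp'ne (sorted_nil_of hp' _ (by rw [hshp', hcc]) (by rw [h0]))
          obtain ⟨m2, t2, hdr⟩ : ∃ m2 t2, F'.drop c' = m2 :: t2 := by
            cases hx : F'.drop c' with
            | nil => exact absurd hx hdne
            | cons a b => exact ⟨a, b, rfl⟩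
          rw [hdr]
          refine ⟨fun h0 => absurd h0 (Option.some_ne_none _), ?_⟩
          intro p' hp'2
          injection hp'2 with hp'2; subst hp'2
          refine ⟨rest ++ [(p, hp')], g', by simp, ?_, ?_, ?_, ?_, ?_⟩
          · intro q hq
            rcases List.mem_append.mp hq with hq2 | hq2
            · exact ⟨by have := hkeys q hq2; omega, (hrest q hq2).2⟩
            · simp at hq2; subst hq2; exact ⟨by omega, hhp'ne⟩
          · exact sorted_ne_nil g' _ hg' (by simp)
          · rw [hg', hcc]
            show [m + 1] ++ (F'.take c').map (· + 1)
              = List.replicate (c' + 1 - (c' + 1)) 1 ++ ((m :: F').take (c' + 1)).map (· + 1)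
            simp [List.take_succ_cons]
          · intro y hy
            have hy' : y ∈ List.replicate (c' + 1 - (c' + 1)) 1
                ++ ((m :: F').take (c' + 1)).map (· + 1) := hy
            rcases List.mem_append.mp hy' with hy2 | hy2
            · have := List.eq_of_mem_replicate hy2; omega
            · obtain ⟨x, hx, rfl⟩ := List.mem_map.mp hy2
              have := honeF x (List.mem_of_mem_take hx); omega
          · show some (omin best m2) = bestOf none (rest ++ [(p, hp')])
            rw [bestOf_append, hbest',
              hmin_sorted hp' m2 t2 (by rw [hshp', hcc, hdr])]
    · -- gap (or first-run-after-gap): all open chains close, fresh 1-chains start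
      have hkeys1 : ∀ q ∈ rest ++ [(p, h)], q.1 ≠ v - 1 := by
        intro q hq
        rcases List.mem_append.mp hq with hq | hq
        · have := (hrest q hq).1; omega
        · simp at hq; subst hq; omega
      have hkeys2 : ∀ q ∈ rest ++ [(p, h)], q.1 ≠ v := by
        intro q hq
        rcases List.mem_append.mp hq with hq | hq
        · have := (hrest q hq).1; omega
        · simp at hq; subst hq; omega
      rw [show List.replicate (c' + 1) v = v :: List.replicate c' v from rfl,
        List.foldl_cons, step_new _ v hkeys1 hkeys2]
      obtain ⟨g', hg', hfold⟩ := onesPhase c' (rest ++ [(p, h)]) v [1] [1]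
        (fun q hq => ⟨hkeys1 q hq, hkeys2 q hq⟩) rfl (by simp)
      rw [hfold, bstepN_gap best (m :: F') (some p) v (c' + 1)
        (fun h0 => hadj (Option.some.inj h0))]
      refine ⟨fun h0 => absurd h0 (Option.some_ne_none _), ?_⟩
      intro p' hp'
      injection hp' with hp'; subst hp'
      refine ⟨rest ++ [(p, h)], g', by simp, ?_, ?_, ?_, ?_, ?_⟩
      · intro q hq
        rcases List.mem_append.mp hq with hq | hq
        · exact ⟨by have := (hrest q hq).1; omega, (hrest q hq).2⟩
        · simp at hq; subst hq; exact ⟨hpv, hhne⟩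
      · exact sorted_ne_nil g' _ hg' (by simp)
      · rw [hg']; simp [List.replicate_succ']
      · intro y hy
        have hy' : y ∈ List.replicate (c' + 1) 1 := hy
        have := List.eq_of_mem_replicate hy'; omega
      · show some (omin best m) = bestOf none (rest ++ [(p, h)])
        rw [bestOf_append, hbest', hmin_sorted h m F' hsF]

lemma bstepN_prev (st : Option Int × List Int × Option Int) (v : Int) (c : ℕ) :
    (bstepN st v c).2.2 = some v := by
  unfold bstepN; split <;> rfl

-- ---- whole loop over the distinct sorted values ----
lemma mainLoop (cnt : Int → ℕ) : ∀ (ks : List Int) (d : PySem.Dict Int (List Int))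
    (st : Option Int × List Int × Option Int),
    SimInv d st →
    ks.Pairwise (· < ·) →
    (∀ v ∈ ks, 1 ≤ cnt v) →
    (∀ p, st.2.2 = some p → ∀ v ∈ ks, p < v) →
    SimInv ((ks.flatMap (fun v => List.replicate (cnt v) v)).foldl teamStep d)
        (ks.foldl (fun st v => bstepN st v (cnt v)) st) := by
  intro ks
  induction ks with
  | nil => intro d st hInv _ _ _; exact hInv
  | cons v ks ih =>
    intro d st hInv hpw hcnt hprev
    rw [List.flatMap_cons, List.foldl_append, List.foldl_cons]
    have h1 : SimInv ((List.replicate (cnt v) v).foldl teamStep d) (bstepN st v (cnt v)) :=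
      blockStep d st v (cnt v) (hcnt v List.mem_cons_self) hInv
        (fun p hp => hprev p hp v List.mem_cons_self)
    exact ih _ _ h1 (List.pairwise_cons.mp hpw).2
      (fun w hw => hcnt w (List.mem_cons_of_mem _ hw))
      (fun p hp w hw => by
        rw [bstepN_prev] at hp
        cases hp
        exact (List.pairwise_cons.mp hpw).1 w hw)

lemma foldl_prev (cnt : Int → ℕ) (ks : List Int)
    (st : Option Int × List Int × Option Int) (h : ks ≠ []) :
    ∃ p, (ks.foldl (fun st v => bstepN st v (cnt v)) st).2.2 = some p := by
  rcases List.eq_nil_or_concat ks with rfl | ⟨l', b, rfl⟩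
  · exact absurd rfl h
  · rw [List.concat_eq_append, List.foldl_append, List.foldl_cons, List.foldl_nil]
    exact ⟨b, bstepN_prev _ _ _⟩

-- ---- sorted iq decomposes into runs over the distinct sorted values ----
lemma count_flat (iq : List Int) : ∀ (ks : List Int), ks.Nodup → ∀ (a : Int),
    (ks.flatMap (fun v => List.replicate (iq.count v) v)).count a
      = if a ∈ ks then iq.count a else 0 := by
  intro ks
  induction ks with
  | nil => intro _ a; simp
  | cons v t ih =>
    intro hnd a
    rw [List.flatMap_cons, List.count_append, ih (List.nodup_cons.mp hnd).2 a]
    by_cases hav : a = v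
    · subst hav
      have hat : a ∉ t := (List.nodup_cons.mp hnd).1
      simp [hat]
    · simp [List.count_replicate, hav, Ne.symm hav]

lemma sorted_flat (iq : List Int) :
    PySem.List.sorted iq (fun x => x) =
      (PySem.List.sorted (PySem.Set.ofList iq) (fun x => x)).flatMap
        (fun v => List.replicate (iq.count v) v) := by
  have hnd : (PySem.List.sorted (PySem.Set.ofList iq) (fun x => x)).Nodup :=
    ((PySem.List.sorted_perm (PySem.Set.ofList iq) (fun x => x) false).nodup_iff).mpr
      (PySem.Set.nodup_ofList iq)
  apply PySem.List.sorted_id_eq_of_perm_of_pairwise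
  · rw [List.perm_iff_count]
    intro a
    rw [count_flat iq _ hnd a]
    by_cases ha : a ∈ iq
    · have hm : a ∈ PySem.List.sorted (PySem.Set.ofList iq) (fun x => x) := by
        rw [PySem.List.mem_sorted, PySem.Set.mem_ofList]; exact ha
      simp [hm]
    · have hm : a ∉ PySem.List.sorted (PySem.Set.ofList iq) (fun x => x) := by
        rw [PySem.List.mem_sorted, PySem.Set.mem_ofList]; exact ha
      simp [hm, List.count_eq_zero.mpr ha]
  · rw [List.flatMap_def, List.pairwise_flatten]
    refine ⟨?_, ?_⟩
    · intro l hl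
      obtain ⟨w, _, rfl⟩ := List.mem_map.mp hl
      exact List.pairwise_replicate.mpr (Or.inr le_rfl)
    · rw [List.pairwise_map]
      apply List.Pairwise.imp ?_ (PySem.List.sorted_ofList_pairwise_lt iq)
      intro a b hab x hx y hy
      rw [List.eq_of_mem_replicate hx, List.eq_of_mem_replicate hy]
      exact le_of_lt hab

-- ---- B side bridges ----
lemma bstepN_pos (best : Option Int) (F : List Int) (prev : Option Int) (v : Int) (c : ℕ)
    (h : prev = some (v - 1)) :
    bstepN (best, F, prev) v c =
      ((match F.drop (min c F.length) with
        | [] => best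
        | m :: _ => some (omin best m)),
       List.replicate (c - min c F.length) 1 ++ (F.take (min c F.length)).map (· + 1),
       some v) := by
  unfold bstepN
  rw [if_pos h]

lemma teamAltStep_pos (c : Int) (best : Option Int) (F : List Int) (prev : Option Int)
    (v : Int) (h : prev = some (v - 1)) :
    teamAltStep c (best, F, prev) v =
      ((match F.drop (min c (F.length : Int)).toNat with
        | [] => best
        | m :: _ => match best with
          | none => some m
          | some b => if m < b then some m else some b),
       List.replicate (c - min c (F.length : Int)).toNat 1
         ++ (F.take (min c (F.length : Int)).toNat).map (· + 1),
       some v) := by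
  unfold teamAltStep
  rw [if_pos h]

lemma teamAltStep_neg (c : Int) (best : Option Int) (F : List Int) (prev : Option Int)
    (v : Int) (h : prev ≠ some (v - 1)) :
    teamAltStep c (best, F, prev) v =
      ((match F with
        | [] => best
        | m :: _ => match best with
          | none => some m
          | some b => if m < b then some m else some b),
       List.replicate c.toNat 1, some v) := by
  unfold teamAltStep
  rw [if_neg h]

lemma teamAltStep_nat (st : Option Int × List Int × Option Int) (v : Int) (n : ℕ) :
    teamAltStep (n : Int) st v = bstepN st v n := by
  obtain ⟨best, F, prev⟩ := st
  by_cases hp : prev = some (v - 1)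
  · rw [teamAltStep_pos (n : Int) best F prev v hp, bstepN_pos best F prev v n hp]
    have hk : (min (n : Int) ((F.length : ℕ) : Int)).toNat = min n F.length := by omega
    have hck : ((n : Int) - min (n : Int) ((F.length : ℕ) : Int)).toNat
        = n - min n F.length := by omega
    rw [hk, hck]
    cases hd : F.drop (min n F.length) with
    | nil => rfl
    | cons m t =>
      simp only [Prod.mk.injEq]
      exact ⟨match_omin best m, trivial⟩
  · rw [teamAltStep_neg (n : Int) best F prev v hp, bstepN_gap best F prev v n hp]
    have hn : (n : Int).toNat = n := by omega
    rw [hn]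
    cases F with
    | nil => rfl
    | cons m t =>
      simp only [Prod.mk.injEq]
      exact ⟨match_omin best m, trivial⟩

-- min of an already-sorted nonempty list is its head
lemma min?_of_sorted_eq (F : List Int) (m : Int) (t : List Int)
    (hpw : F.Pairwise (· ≤ ·)) (hF : F = m :: t) :
    PySem.List.min? F (fun x => x) = some m := by
  subst hF
  apply min?_sorted_cons (m :: t) m t
  exact PySem.List.sorted_eq_self_of_pairwise (m :: t) (fun x => x) hpw

lemma match_omin2 (best : Option Int) (m : Int) :
    (match best with
     | some b => if b < m then b else m
     | none => m) = omin best m := by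
  cases best with
  | none => rfl
  | some b =>
    show (if b < m then b else m) = (if m < b then m else b)
    split_ifs <;> omega

-- ===== VERDICT (by name: the statement is the Claim_ definition above) =====
theorem team_spec : Claim_equal_team := by
  unfold Claim_equal_team
  intro iq _ hpre
  unfold Pre_team at hpre
  unfold Spec_team
  simp only [team, team_alt]
  rw [PySem.Dict.foldl_insert_getD_add_one_eq_counter iq, PySem.Dict.keys_counter iq]
  have hfoldB :
      (PySem.List.sorted (PySem.Set.ofList iq) (fun x => x)).foldl
          (fun st v => teamAltStep ((PySem.Dict.counter iq).getD v 0) st v)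
          ((none : Option Int), ([] : List Int), (none : Option Int))
        = (PySem.List.sorted (PySem.Set.ofList iq) (fun x => x)).foldl
          (fun st v => bstepN st v (iq.count v))
          ((none : Option Int), ([] : List Int), (none : Option Int)) := by
    apply PySem.List.foldl_congr_mem
    intro acc x hx
    rw [PySem.Dict.getD_counter iq x, teamAltStep_nat]
  rw [hfoldB, sorted_flat iq]
  have hInv0 : SimInv PySem.Dict.empty
      ((none : Option Int), ([] : List Int), (none : Option Int)) :=
    ⟨fun _ => ⟨rfl, rfl, rfl⟩, fun p h => absurd h.symm (Option.some_ne_none p)⟩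
  have hcnt : ∀ v ∈ PySem.List.sorted (PySem.Set.ofList iq) (fun x => x), 1 ≤ iq.count v := by
    intro v hv
    rw [PySem.List.mem_sorted, PySem.Set.mem_ofList] at hv
    exact List.count_pos_iff.mpr hv
  have hInv := mainLoop (fun v => iq.count v)
    (PySem.List.sorted (PySem.Set.ofList iq) (fun x => x)) PySem.Dict.empty
    ((none : Option Int), ([] : List Int), (none : Option Int)) hInv0
    (PySem.List.sorted_ofList_pairwise_lt iq) hcnt
    (fun p hp => absurd hp.symm (Option.some_ne_none p))
  have hksne : PySem.List.sorted (PySem.Set.ofList iq) (fun x => x) ≠ [] := by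
    intro h0
    rw [PySem.List.sorted_eq_nil_iff] at h0
    cases hiq : iq with
    | nil => exact hpre hiq
    | cons x t =>
      have hx : x ∈ PySem.Set.ofList iq :=
        (PySem.Set.mem_ofList iq x).mpr (by rw [hiq]; exact List.mem_cons_self)
      rw [h0] at hx
      cases hx
  obtain ⟨p, hprev⟩ := foldl_prev (fun v => iq.count v)
    (PySem.List.sorted (PySem.Set.ofList iq) (fun x => x))
    ((none : Option Int), ([] : List Int), (none : Option Int)) hksne
  obtain ⟨rest, h, hitems, hrest, hhne, hsortF, honeF, hbest⟩ := hInv.2 p hprev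
  rw [hitems, final_eq rest p h (fun q hq => (hrest q hq).2) hhne]
  obtain ⟨m0, t0, hF⟩ : ∃ m0 t0,
      ((PySem.List.sorted (PySem.Set.ofList iq) (fun x => x)).foldl
        (fun st v => bstepN st v (iq.count v))
        ((none : Option Int), ([] : List Int), (none : Option Int))).2.1 = m0 :: t0 := by
    cases hx : ((PySem.List.sorted (PySem.Set.ofList iq) (fun x => x)).foldl
        (fun st v => bstepN st v (iq.count v))
        ((none : Option Int), ([] : List Int), (none : Option Int))).2.1 with
    | nil => exact absurd (sorted_nil_of h _ hsortF hx) hhne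
    | cons a b => exact ⟨a, b, rfl⟩
  have hsF : PySem.List.sorted h (fun x => x) = m0 :: t0 := by rw [hsortF, hF]
  rw [hF, min?_of_sorted_eq (m0 :: t0) m0 t0 (sorted_pw h _ hsF) rfl]
  rw [show (some m0).getD 0 = m0 from rfl]
  rw [hmin_sorted h m0 t0 hsF, ← hbest, match_omin2]
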